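-- pv_equiv track=rewrite | github.com/AciolyVinicius/BitMaze | ProjetoFinal_BitMaze.py | control_joystick
-- ===== SOURCE A (Python) =====
-- LED_MATRIZ = [
--     [24, 23, 22, 21, 20],
--     [15, 16, 17, 18, 19],
--     [14, 13, 12, 11, 10],
--     [5, 6, 7, 8, 9],
--     [4, 3, 2, 1, 0]
-- ]
--
-- right_side = [20, 19, 10, 9, 0]
--
-- left_side = [24, 15, 14, 5, 4]
--
-- top = [0, 1, 2, 3, 4]
--
-- botton = [20, 21, 22, 23, 24]
--
-- def control_joystick(adc_x, adc_y, position):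
--     """
--         Função que obtem a coordenada atual da posição do player e atualiza conforme
--         valor no joystick (adc_x, adc_y).
--     """
--
--     row_index, column_index = next(((index, row.index(position)) for index, row in enumerate(LED_MATRIZ) if position in row))
--     if adc_x >= 20000:
--         if position in right_side:
--             return -1
--         position = position - 1 if row_index % 2 == 0 else position + 1
--     elif adc_x <= -20000:
--         if position in left_side:
--             return -2
--         position = position - 1 if row_index % 2 == 1 else position + 1
--     if adc_y >= 20000:
--         if position in top:
--             return -3
--         position = LED_MATRIZ[row_index+1][column_index]
--     elif adc_y <= -20000:
--         if position in botton:
--             return -4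
--         position = LED_MATRIZ[row_index-1][column_index]
--
--     return position
-- ===== SOURCE B (Python) =====
-- def control_joystick(adc_x, adc_y, position):
--     """Arithmetic (serpentine-index) reimplementation: no matrix scan."""
--     strip = position // 5
--     col = position % 5
--     if strip % 2 == 0:
--         col = 4 - col
--     if adc_x >= 20000:
--         if col == 4:
--             return -1
--         position += 1 if strip % 2 == 1 else -1
--     elif adc_x <= -20000:
--         if col == 0:
--             return -2
--         position += -1 if strip % 2 == 1 else 1
--     if adc_y >= 20000:
--         if strip == 0:
--             return -3
--         ns = strip - 1
--         return 5 * ns + (col if ns % 2 == 1 else 4 - col)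
--     elif adc_y <= -20000:
--         if strip == 4:
--             return -4
--         ns = strip + 1
--         return 5 * ns + (col if ns % 2 == 1 else 4 - col)
--     return position
-- ===== Notes on version B (the rewrite author's own statement) =====
-- stated objective: simpler
-- what changed: Replaces the generator scan of LED_MATRIZ (and its per-row .index) and the four edge-membership lists by closed-form serpentine index arithmetic: strip = position//5, column from position%5 with row parity, edges tested as column/strip equalities and vertical moves computed as 5*ns ± column.
import Mathlib
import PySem

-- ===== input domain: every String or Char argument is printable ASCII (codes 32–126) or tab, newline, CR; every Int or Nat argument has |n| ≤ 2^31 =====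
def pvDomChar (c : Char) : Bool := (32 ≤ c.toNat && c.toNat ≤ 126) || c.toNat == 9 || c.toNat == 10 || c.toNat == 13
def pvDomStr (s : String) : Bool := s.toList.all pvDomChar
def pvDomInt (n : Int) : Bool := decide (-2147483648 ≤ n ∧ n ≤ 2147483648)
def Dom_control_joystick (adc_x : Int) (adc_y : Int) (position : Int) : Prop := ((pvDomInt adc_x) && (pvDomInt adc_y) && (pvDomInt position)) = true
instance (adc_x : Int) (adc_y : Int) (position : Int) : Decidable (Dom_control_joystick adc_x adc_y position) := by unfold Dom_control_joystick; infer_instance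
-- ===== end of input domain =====

-- B replaces A's generator scan of LED_MATRIZ and the four edge-list membership
-- tests by serpentine index arithmetic (position//5, position%5); objective: simpler.

-- ===== PORT A =====
def ledMatriz : List (List Int) :=
  [[24, 23, 22, 21, 20], [15, 16, 17, 18, 19], [14, 13, 12, 11, 10], [5, 6, 7, 8, 9], [4, 3, 2, 1, 0]]
def rightSide : List Int := [20, 19, 10, 9, 0]
def leftSide : List Int := [24, 15, 14, 5, 4]
def topRow : List Int := [0, 1, 2, 3, 4]
def botton : List Int := [20, 21, 22, 23, 24]

-- the generator: first (index, row.index(position)) over enumerate(LED_MATRIZ) with position in row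
def cjScan (rows : List (List Int)) (idx : Int) (p : Int) : Option (Int × Int) :=
  match rows with
  | [] => none
  | r :: rs =>
    if p ∈ r then
      match PySem.List.index? r p with
      | some c => some (idx, c)
      | none => none
    else cjScan rs (idx + 1) p

-- the straight-line part after the adc_x branches (Python falls through to the adc_y ifs)
def cjVert (adc_y : Int) (row_index : Int) (column_index : Int) (position : Int) : Int :=
  if adc_y ≥ 20000 then
    if position ∈ topRow then -3
    else (PySem.List.pyGet? ((PySem.List.pyGet? ledMatriz (row_index + 1)).getD []) column_index).getD 0
  else if adc_y ≤ -20000 then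
    if position ∈ botton then -4
    else (PySem.List.pyGet? ((PySem.List.pyGet? ledMatriz (row_index - 1)).getD []) column_index).getD 0
  else position

def control_joystick (adc_x : Int) (adc_y : Int) (position : Int) : Int :=
  match cjScan ledMatriz 0 position with
  | none => 0  -- Python raises StopIteration here; excluded by Pre_control_joystick
  | some (row_index, column_index) =>
    if adc_x ≥ 20000 then
      if position ∈ rightSide then -1
      else cjVert adc_y row_index column_index
        (if row_index % 2 == 0 then position - 1 else position + 1)
    else if adc_x ≤ -20000 then
      if position ∈ leftSide then -2
      else cjVert adc_y row_index column_index
        (if row_index % 2 == 1 then position - 1 else position + 1)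
    else cjVert adc_y row_index column_index position

-- ===== PORT B =====
def control_joystick_alt (adc_x : Int) (adc_y : Int) (position : Int) : Int :=
  let strip := PySem.Int.floordiv position 5
  let col0 := PySem.Int.mod position 5
  let col := if PySem.Int.mod strip 2 == 0 then 4 - col0 else col0
  let vert : Int → Int := fun pos =>
    if adc_y ≥ 20000 then
      if strip == 0 then -3
      else
        let ns := strip - 1
        5 * ns + (if PySem.Int.mod ns 2 == 1 then col else 4 - col)
    else if adc_y ≤ -20000 then
      if strip == 4 then -4
      else
        let ns := strip + 1
        5 * ns + (if PySem.Int.mod ns 2 == 1 then col else 4 - col)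
    else pos
  if adc_x ≥ 20000 then
    if col == 4 then -1
    else vert (position + (if PySem.Int.mod strip 2 == 1 then 1 else -1))
  else if adc_x ≤ -20000 then
    if col == 0 then -2
    else vert (position + (if PySem.Int.mod strip 2 == 1 then -1 else 1))
  else vert position

-- ===== PRECONDITION & SPEC =====
-- Pre_ excludes exactly the positions not on the board (not 0..24), where Python A raises StopIteration.
def Pre_control_joystick (adc_x : Int) (adc_y : Int) (position : Int) : Prop :=
  0 ≤ position ∧ position ≤ 24
instance (adc_x : Int) (adc_y : Int) (position : Int) : Decidable (Pre_control_joystick adc_x adc_y position) := by unfold Pre_control_joystick; infer_instance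
def pvWitness_control_joystick : Int × Int × Int := (0, 0, 12)

def Spec_control_joystick (adc_x : Int) (adc_y : Int) (position : Int) (out : Int) : Prop := out = control_joystick_alt adc_x adc_y position
instance (adc_x : Int) (adc_y : Int) (position : Int) (out : Int) : Decidable (Spec_control_joystick adc_x adc_y position out) := by unfold Spec_control_joystick; infer_instance

-- ===== CLAIM (what is proved, stated in full; the proofs are below) =====
def Claim_equal_control_joystick : Prop := ∀ (adc_x : Int) (adc_y : Int) (position : Int), Dom_control_joystick adc_x adc_y position → Pre_control_joystick adc_x adc_y position → Spec_control_joystick adc_x adc_y position (control_joystick adc_x adc_y position)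

-- ===== LEMMAS AND PROOFS =====
set_option maxHeartbeats 2000000

-- ===== VERDICT (by name: the statement is the Claim_ definition above) =====
theorem control_joystick_spec : Claim_equal_control_joystick := by
  intro adc_x adc_y position _hd hpre
  unfold Spec_control_joystick
  obtain ⟨h0, h24⟩ := hpre
  interval_cases position <;>
    simp [control_joystick, control_joystick_alt, cjScan, cjVert, ledMatriz,
      rightSide, leftSide, topRow, botton, PySem.List.index?, PySem.Int.floordiv,
      PySem.Int.mod, PySem.List.pyGet?, PySem.List.pyIdx?, List.idxOf?, List.findIdx?,
      List.findIdx?.go, Int.fdiv, Int.fmod, Int.emod]
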